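-- pv_equiv track=rewrite | github.com/ahmedmadbouly186/RSA-in-python | client.py | get_numeric_sequnce
-- ===== SOURCE A (Python) =====
-- def alphabet_conversion(char):
--     out = 0
--     find1 = char.isnumeric()
--     find2 = char.isalpha()
--     find3 = char == ' '
--     if (find1):
--         out = int(char)
--     elif (find2):
--         out = ord(char)-ord('a')+10
--     elif (find3):
--         out = 36
--     return out
--
-- def get_numeric_sequnce(message):
--     sequence = []
--     sequence_size = len(message)//5
--     for i in range(sequence_size):
--         block = message[5*i:5*i+5]
--         block_number = 0
--         for j in range(5):
--             block_number += pow(37, j) * alphabet_conversion(block[j])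
--         sequence.append(block_number)
--     return sequence
-- ===== SOURCE B (Python) =====
-- def alphabet_conversion(char):
--     out = 0
--     find1 = char.isnumeric()
--     find2 = char.isalpha()
--     find3 = char == ' '
--     if (find1):
--         out = int(char)
--     elif (find2):
--         out = ord(char)-ord('a')+10
--     elif (find3):
--         out = 36
--     return out
--
-- def get_numeric_sequnce(message):
--     # Horner's method per 5-char block, last char to first: no pow calls.
--     return [horner_block(message[5*i:5*i+5]) for i in range(len(message)//5)]
--
-- def horner_block(block):
--     block_number = 0
--     for ch in reversed(block):
--         block_number = block_number * 37 + alphabet_conversion(ch)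
--     return block_number
-- ===== Notes on version B (the rewrite author's own statement) =====
-- stated objective: simpler
-- what changed: Each 5-char block's base-37 value is computed by Horner's method folding the reversed block with one accumulator (block*37+digit), replacing the explicit pow(37, j)-weighted summation; the output list is built by a comprehension instead of append.
import Mathlib
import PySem

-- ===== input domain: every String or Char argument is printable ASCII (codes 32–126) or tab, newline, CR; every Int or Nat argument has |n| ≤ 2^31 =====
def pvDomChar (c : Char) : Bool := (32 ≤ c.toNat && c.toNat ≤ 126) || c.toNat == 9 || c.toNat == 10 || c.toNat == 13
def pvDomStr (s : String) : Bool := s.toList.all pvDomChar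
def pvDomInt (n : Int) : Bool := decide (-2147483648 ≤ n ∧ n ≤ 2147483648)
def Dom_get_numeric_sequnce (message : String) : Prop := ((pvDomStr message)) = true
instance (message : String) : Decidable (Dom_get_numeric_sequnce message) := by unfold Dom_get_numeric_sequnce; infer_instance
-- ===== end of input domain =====

-- B replaces the per-block sum of pow(37, j)-weighted terms by Horner's method over the
-- reversed block (objective: simpler — no pow calls, one accumulator).

-- ===== PORT A =====
-- char.isnumeric() coincides with isdigit on the printable-ASCII domain; int(char) for a
-- single digit character is its digit value (exact on Dom, where it never raises).
def alphabet_conversion (c : Char) : Int :=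
  let out : Int := 0
  let find1 := PySem.Chars.isdigit c
  let find2 := PySem.Chars.isalpha c
  let find3 := c == ' '
  if find1 then (c.toNat : Int) - 48
  else if find2 then (c.toNat : Int) - 97 + 10
  else if find3 then 36
  else out

def get_numeric_sequnce (message : String) : List Int :=
  let cs := message.toList
  (PySem.List.pyRange 0 (PySem.Int.floordiv (cs.length : Int) 5) 1).foldl
    (fun sequence i =>
      let block := PySem.List.slice cs (some (5*i)) (some (5*i+5))
      let block_number :=
        (PySem.List.pyRange 0 5 1).foldl
          (fun acc j => acc + 37 ^ j.toNat * alphabet_conversion (PySem.List.pyGetD block j ' ')) 0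
      sequence ++ [block_number]) []

-- ===== PORT B =====
def horner_block (block : List Char) : Int :=
  block.reverse.foldl (fun acc c => acc * 37 + alphabet_conversion c) 0

def get_numeric_sequnce_alt (message : String) : List Int :=
  let cs := message.toList
  (List.range (cs.length / 5)).map
    (fun (i : Nat) => horner_block (PySem.List.slice cs (some (5*(i:Int))) (some (5*(i:Int)+5))))

-- ===== PRECONDITION & SPEC =====
def Spec_get_numeric_sequnce (message : String) (out : List Int) : Prop := out = get_numeric_sequnce_alt message
instance (message : String) (out : List Int) : Decidable (Spec_get_numeric_sequnce message out) := by unfold Spec_get_numeric_sequnce; infer_instance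

-- ===== CLAIM (what is proved, stated in full; the proofs are below) =====
def Claim_equal_get_numeric_sequnce : Prop := ∀ (message : String), Dom_get_numeric_sequnce message → Spec_get_numeric_sequnce message (get_numeric_sequnce message)

-- ===== LEMMAS AND PROOFS =====

lemma range_cast (n : Nat) : PySem.List.pyRange 0 (n:Int) 1 = (List.range n).map (fun (k : Nat) => (k:Int)) := by
  rw [PySem.List.pyRange_one]; simp

-- a list of length 5 is a 5-tuple
lemma list_len5 {α : Type} (l : List α) (h : l.length = 5) :
    ∃ a b c d e, l = [a, b, c, d, e] := by
  match l, h with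
  | [a, b, c, d, e], _ => exact ⟨a, b, c, d, e, rfl⟩

-- the per-block equality: power sum = Horner on the reversed block, for 5-element blocks
lemma block_eq (block : List Char) (h : block.length = 5) :
    (PySem.List.pyRange 0 5 1).foldl
      (fun acc j => acc + 37 ^ j.toNat * alphabet_conversion (PySem.List.pyGetD block j ' ')) 0
      = horner_block block := by
  obtain ⟨a, b, c, d, e, rfl⟩ := list_len5 block h
  show (PySem.List.pyRange 0 5 1).foldl _ 0 = _
  rw [show PySem.List.pyRange 0 5 1 = [0, 1, 2, 3, 4] from by decide]
  simp [horner_block, PySem.List.pyGetD, PySem.List.pyGet?, PySem.List.pyIdx?, List.foldl]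
  ring

lemma slice_len5 (cs : List Char) (k : Nat) (hk : k < cs.length / 5) :
    (PySem.List.slice cs (some (5*(k:Int))) (some (5*(k:Int)+5))).length = 5 := by
  rw [PySem.List.slice_toNat (ha := by positivity) (hb := by positivity)]
  have h5 : 5 * k + 5 ≤ cs.length := by omega
  have : ((5*(k:Int)).toNat) = 5 * k := by omega
  have h2 : ((5*(k:Int)+5).toNat) = 5 * k + 5 := by omega
  simp [this, h2, List.length_take, List.length_drop]
  omega

-- ===== VERDICT (by name: the statement is the Claim_ definition above) =====
theorem get_numeric_sequnce_spec : Claim_equal_get_numeric_sequnce := by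
  intro message _
  unfold Spec_get_numeric_sequnce get_numeric_sequnce get_numeric_sequnce_alt
  have hfd : PySem.Int.floordiv (message.toList.length : Int) 5 = ((message.toList.length / 5 : Nat) : Int) := by
    exact_mod_cast PySem.Int.floordiv_natCast message.toList.length 5
  simp only [hfd, PySem.List.foldl_append_singleton_eq_map, range_cast, List.map_map,
    List.nil_append]
  apply List.map_congr_left
  intro k hk
  simp only [Function.comp]
  exact block_eq _ (slice_len5 message.toList k (List.mem_range.mp hk))
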